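-- pv_equiv track=rewrite | github.com/Srivastav-Anmol/Niet_CodeTantra_Python | Competitive Coding-1/problem on Strings/CTP21051.py | isPrimeLenghtPalindrome
-- ===== SOURCE A (Python) =====
-- def isPrimeLenghtPalindrome(s):
--     temp=""
--     n=len(s)
--     flag=0
--     if n>1:
--         for i in range(2,n):
--             if n%i==0:
--                 flag=1
--                 break
--     if flag==1:
--         return False
--     else:
--         for i in s:
--             temp=i+temp
--         if temp==s and flag==0:
--             return True
--         else:
--             return False
-- ===== SOURCE B (Python) =====
-- def isPrimeLenghtPalindrome(s):
--     n = len(s)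
--     if n > 1:
--         i = 2
--         while i * i <= n:
--             if n % i == 0:
--                 return False
--             i += 1
--     return s == s[::-1]
-- ===== Notes on version B (the rewrite author's own statement) =====
-- stated objective: alternative
-- what changed: Trial division stops at sqrt(n) (while i*i<=n with early return) instead of scanning all of range(2,n) with a flag variable, and the palindrome test is a direct s==s[::-1] slice comparison instead of building the reversal character by character.
import Mathlib
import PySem

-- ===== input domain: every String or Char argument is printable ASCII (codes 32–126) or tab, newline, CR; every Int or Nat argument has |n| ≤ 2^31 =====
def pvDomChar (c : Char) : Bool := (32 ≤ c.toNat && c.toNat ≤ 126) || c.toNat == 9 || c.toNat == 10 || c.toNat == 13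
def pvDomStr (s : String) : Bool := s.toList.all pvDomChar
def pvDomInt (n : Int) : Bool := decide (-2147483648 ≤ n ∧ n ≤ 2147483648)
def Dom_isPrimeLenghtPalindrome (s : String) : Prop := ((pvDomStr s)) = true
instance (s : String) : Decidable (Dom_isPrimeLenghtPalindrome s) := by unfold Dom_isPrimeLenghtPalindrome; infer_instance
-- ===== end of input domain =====

-- B replaces A's full range(2,n) divisor scan by trial division up to sqrt(n) and the
-- hand-built reversal by the s == s[::-1] slice comparison (objective: alternative algorithm).

-- ===== PORT A =====
-- the 'for i in range(2,n): if n%i==0: flag=1; break' loop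
def flagLoopA (n : Int) : List Int → Int
  | [] => 0
  | i :: rest => if PySem.Int.mod n i == 0 then 1 else flagLoopA n rest

def isPrimeLenghtPalindrome (s : String) : Bool :=
  let n : Int := PySem.Str.len s
  let flag : Int := if 1 < n then flagLoopA n (PySem.List.pyRange 2 n 1) else 0
  if flag == 1 then false
  else
    -- temp accumulated by 'temp = i + temp' (string prepend, exact over List Char)
    let temp : List Char := s.toList.foldl (fun temp i => i :: temp) []
    if temp == s.toList && flag == 0 then true else false

-- ===== PORT B =====
-- the 'while i*i <= n: if n%i==0: return False; i += 1' loop; returns true iff a divisor was found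
def trialLoopB (n i : Int) : Bool :=
  if h : i * i ≤ n then
    if PySem.Int.mod n i == 0 then true else trialLoopB n (i + 1)
  else false
termination_by (n + 1 - i).toNat
decreasing_by
  have h1 : (0:Int) ≤ i * i := mul_self_nonneg i
  have h3 : 2 * i ≤ n + 1 := by nlinarith [mul_self_nonneg (i - 1)]
  omega

def isPrimeLenghtPalindrome_alt (s : String) : Bool :=
  let n : Int := PySem.Str.len s
  if 1 < n && trialLoopB n 2 then false
  else s.toList == ((PySem.List.slice? s.toList none none (-1)).getD [])  -- s == s[::-1]

-- ===== PRECONDITION & SPEC =====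
def Spec_isPrimeLenghtPalindrome (s : String) (out : Bool) : Prop := out = isPrimeLenghtPalindrome_alt s
instance (s : String) (out : Bool) : Decidable (Spec_isPrimeLenghtPalindrome s out) := by unfold Spec_isPrimeLenghtPalindrome; infer_instance

-- ===== CLAIM (what is proved, stated in full; the proofs are below) =====
def Claim_equal_isPrimeLenghtPalindrome : Prop := ∀ (s : String), Dom_isPrimeLenghtPalindrome s → Spec_isPrimeLenghtPalindrome s (isPrimeLenghtPalindrome s)

-- ===== LEMMAS AND PROOFS =====

theorem flagLoopA_eq_any (n : Int) (l : List Int) :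
    flagLoopA n l = if l.any (fun i => PySem.Int.mod n i == 0) then 1 else 0 := by
  induction l with
  | nil => rfl
  | cons i rest ih => by_cases h : PySem.Int.mod n i == 0 <;> simp [flagLoopA, h, ih]

theorem trialLoopB_iff (n i : Int) (hi : 2 ≤ i) :
    trialLoopB n i = true ↔ ∃ j : Int, i ≤ j ∧ j * j ≤ n ∧ PySem.Int.mod n j = 0 := by
  rw [trialLoopB]
  by_cases hle : i * i ≤ n
  · rw [dif_pos hle]
    by_cases hmod : PySem.Int.mod n i == 0
    · rw [if_pos hmod]
      simp only [beq_iff_eq] at hmod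
      exact ⟨fun _ => ⟨i, le_refl i, hle, hmod⟩, fun _ => rfl⟩
    · rw [if_neg hmod]
      rw [trialLoopB_iff n (i + 1) (by omega)]
      constructor
      · rintro ⟨j, hj1, hj2, hj3⟩; exact ⟨j, by omega, hj2, hj3⟩
      · rintro ⟨j, hj1, hj2, hj3⟩
        refine ⟨j, ?_, hj2, hj3⟩
        rcases lt_or_eq_of_le hj1 with h | h
        · omega
        · exact absurd (by simp [h, hj3] : (PySem.Int.mod n i == 0) = true) hmod
  · rw [dif_neg hle]
    constructor
    · intro h; exact absurd h (by simp)
    · rintro ⟨j, hj1, hj2, _⟩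
      exfalso
      have : i * i ≤ j * j := mul_le_mul hj1 hj1 (by omega) (by omega)
      omega
termination_by (n + 1 - i).toNat
decreasing_by
  have h3 : 2 * i ≤ n + 1 := by nlinarith [mul_self_nonneg (i - 1)]
  omega

-- divisor in [2,n) exists iff divisor with square ≤ n exists (n ≥ 2)
theorem divisor_sqrt_iff (n : ℕ) (hn : 2 ≤ n) :
    (∃ i : Int, 2 ≤ i ∧ i < (n : Int) ∧ i ∣ (n : Int)) ↔
    (∃ j : Int, 2 ≤ j ∧ j * j ≤ (n : Int) ∧ j ∣ (n : Int)) := by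
  constructor
  · rintro ⟨i, hi2, hin, hidvd⟩
    have hi0 : 0 ≤ i := by omega
    lift i to ℕ using hi0 with d
    have hd2 : 2 ≤ d := by exact_mod_cast hi2
    have hdn : d < n := by exact_mod_cast hin
    have hddvd : d ∣ n := by exact_mod_cast hidvd
    have hnp : ¬ n.Prime := by
      intro hp
      rcases (Nat.Prime.eq_one_or_self_of_dvd hp d hddvd) with h | h <;> omega
    have hp : (n.minFac).Prime := Nat.minFac_prime (by omega)
    have h2 : 2 ≤ n.minFac := hp.two_le
    have hsq : n.minFac ^ 2 ≤ n := Nat.minFac_sq_le_self (by omega) hnp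
    refine ⟨(n.minFac : Int), by exact_mod_cast h2, ?_, by exact_mod_cast n.minFac_dvd⟩
    have : n.minFac * n.minFac ≤ n := by nlinarith [hsq]
    exact_mod_cast this
  · rintro ⟨j, hj2, hjsq, hjdvd⟩
    have h2j : 2 * j ≤ j * j := by nlinarith
    exact ⟨j, hj2, by omega, hjdvd⟩

theorem foldl_prepend (l acc : List Char) :
    l.foldl (fun t i => i :: t) acc = l.reverse ++ acc := by
  induction l generalizing acc with
  | nil => simp
  | cons c rest ih => simp [List.foldl, ih]

-- whether A's range(2,n) loop finds a divisor = whether B's sqrt loop does (n = len ≥ 2)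
theorem divisor_loops_agree (n : ℕ) (hn : 2 ≤ n) :
    (flagLoopA (n : Int) (PySem.List.pyRange 2 (n : Int) 1) == 1) =
      trialLoopB (n : Int) 2 := by
  rw [flagLoopA_eq_any]
  by_cases hA : (PySem.List.pyRange 2 (n : Int) 1).any (fun i => PySem.Int.mod (n : Int) i == 0)
  · have hex : ∃ i : Int, 2 ≤ i ∧ i < (n : Int) ∧ i ∣ (n : Int) := by
      rcases List.any_eq_true.mp hA with ⟨i, hmem, hmod⟩
      rw [PySem.List.mem_pyRange_one] at hmem
      exact ⟨i, hmem.1, hmem.2, (PySem.Int.mod_eq_zero_iff_dvd _ _).mp (by simpa using hmod)⟩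
    have hB : trialLoopB (n : Int) 2 = true := by
      rw [trialLoopB_iff _ _ (le_refl 2)]
      rcases (divisor_sqrt_iff n hn).mp hex with ⟨j, hj2, hjsq, hjdvd⟩
      exact ⟨j, hj2, hjsq, (PySem.Int.mod_eq_zero_iff_dvd _ _).mpr hjdvd⟩
    simp [hA, hB]
  · have hB : trialLoopB (n : Int) 2 = false := by
      rw [← Bool.not_eq_true, trialLoopB_iff _ _ (le_refl 2)]
      rintro ⟨j, hj2, hjsq, hjmod⟩
      apply hA
      rcases (divisor_sqrt_iff n hn).mpr
          ⟨j, hj2, hjsq, (PySem.Int.mod_eq_zero_iff_dvd _ _).mp hjmod⟩ with ⟨i, hi2, hin, hidvd⟩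
      exact List.any_eq_true.mpr ⟨i, PySem.List.mem_pyRange_one.mpr ⟨hi2, hin⟩,
        by simp [(PySem.Int.mod_eq_zero_iff_dvd _ _).mpr hidvd]⟩
    simp [hA, hB]

theorem list_beq_decide (l m : List Char) : (l == m) = decide (l = m) := by
  by_cases h : l = m <;> simp [h]

-- ===== VERDICT (by name: the statement is the Claim_ definition above) =====
theorem isPrimeLenghtPalindrome_spec : Claim_equal_isPrimeLenghtPalindrome := by
  intro s _
  unfold Spec_isPrimeLenghtPalindrome isPrimeLenghtPalindrome isPrimeLenghtPalindrome_alt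
  simp only [PySem.Str.len_eq, PySem.List.slice?_none_none_neg_one, Option.getD_some,
    foldl_prepend, List.append_nil]
  by_cases hn : 1 < s.length
  · have hn2 : 2 ≤ s.length := by omega
    have hnI : (1 : Int) < (s.length : Int) := by exact_mod_cast hn
    have hagree := divisor_loops_agree s.length hn2
    by_cases hB : trialLoopB (s.length : Int) 2
    · rw [hB] at hagree
      have hflag : flagLoopA (s.length : Int) (PySem.List.pyRange 2 (s.length : Int) 1) = 1 :=
        beq_iff_eq.mp hagree
      simp [hnI, hB, hflag]
    · simp only [Bool.not_eq_true] at hB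
      rw [hB] at hagree
      have hflag : flagLoopA (s.length : Int) (PySem.List.pyRange 2 (s.length : Int) 1) = 0 := by
        rw [flagLoopA_eq_any] at hagree ⊢
        by_cases h : (PySem.List.pyRange 2 (s.length : Int) 1).any
            (fun i => PySem.Int.mod (s.length : Int) i == 0) <;> simp [h] at hagree ⊢
      simp only [list_beq_decide]
      simp [hnI, hB, hflag]
      exact eq_comm
  · have hnI : ¬ (1 : Int) < (s.length : Int) := by exact_mod_cast hn
    simp only [list_beq_decide]
    simp [hnI]
    exact eq_comm
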